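-- pv_equiv track=rewrite | github.com/hyunwoo-9800/pythonBasic | pack04/ex_04_18.py | factorial_expr
-- ===== SOURCE A (Python) =====
-- def factorial_expr(n):
--     if n == 0:
--         return "1", 1                # 0! = 1
--     if n == 1:
--         return "1", 1                # 1! = 1
--     expr_tail, val_tail = factorial_expr(n - 1)
--     expr = f"{n} * ({expr_tail})"    # 문자열 전개
--     return expr, n * val_tail
-- ===== SOURCE B (Python) =====
-- def factorial_expr(n):
--     expr, val = "1", 1
--     for i in range(2, n + 1):
--         expr = f"{i} * ({expr})"
--         val *= i
--     return expr, val
-- ===== Notes on version B (the rewrite author's own statement) =====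
-- stated objective: simpler
-- what changed: Replaced the recursion with a single iterative loop that builds the expansion string and the product together; the empty loop covers the base cases.
import Mathlib
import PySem

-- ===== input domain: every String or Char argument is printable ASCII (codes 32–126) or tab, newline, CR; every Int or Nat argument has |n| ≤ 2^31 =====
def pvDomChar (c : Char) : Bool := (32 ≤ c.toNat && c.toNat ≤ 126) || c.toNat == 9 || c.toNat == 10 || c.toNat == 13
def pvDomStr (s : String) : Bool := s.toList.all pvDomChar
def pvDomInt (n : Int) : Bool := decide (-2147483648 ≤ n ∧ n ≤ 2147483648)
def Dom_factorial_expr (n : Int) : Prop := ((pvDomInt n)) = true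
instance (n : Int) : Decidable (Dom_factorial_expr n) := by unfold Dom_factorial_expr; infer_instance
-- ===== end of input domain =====

-- B replaces A's recursion by one iterative loop over range(2, n+1) building the same string and product; objective: simpler.
-- A raises RecursionError for n < 0; those inputs are excluded by Pre_ (B's return value only is claimed).


-- ===== PORT A =====
def factorial_expr (n : Int) : String × Int :=
  if n = 0 then ("1", 1)
  else if n = 1 then ("1", 1)
  else if n < 0 then ("1", 1)   -- totality guard only: Python recurses forever here (RecursionError); excluded by Pre_
  else
    let r := factorial_expr (n - 1)
    (PySem.Int.toStr n ++ " * (" ++ r.1 ++ ")", n * r.2)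
termination_by n.toNat
decreasing_by omega

-- ===== PORT B =====
def factorial_expr_alt (n : Int) : String × Int :=
  (PySem.List.pyRange 2 (n + 1) 1).foldl
    (fun s i => (PySem.Int.toStr i ++ " * (" ++ s.1 ++ ")", s.2 * i)) ("1", 1)

-- ===== PRECONDITION & SPEC =====
-- A recurses without a base case for negative n (RecursionError), so Pre_ admits exactly 0 ≤ n.
def Pre_factorial_expr (n : Int) : Prop := 0 ≤ n
instance (n : Int) : Decidable (Pre_factorial_expr n) := by unfold Pre_factorial_expr; infer_instance
def pvWitness_factorial_expr : Int := 3

def Spec_factorial_expr (n : Int) (out : String × Int) : Prop := out = factorial_expr_alt n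
instance (n : Int) (out : String × Int) : Decidable (Spec_factorial_expr n out) := by unfold Spec_factorial_expr; infer_instance

-- ===== CLAIM (what is proved, stated in full; the proofs are below) =====
def Claim_equal_factorial_expr : Prop := ∀ (n : Int), Dom_factorial_expr n → Pre_factorial_expr n → Spec_factorial_expr n (factorial_expr n)

-- ===== LEMMAS AND PROOFS =====
theorem factorial_expr_eq_alt_nat (m : Nat) : factorial_expr (m : Int) = factorial_expr_alt (m : Int) := by
  induction m with
  | zero =>
    rw [factorial_expr]
    simp [factorial_expr_alt]
  | succ k ih =>
    rcases Nat.eq_zero_or_pos k with hk | hk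
    · subst hk
      rw [factorial_expr]
      simp [factorial_expr_alt]
    · -- k ≥ 1, so n = k+1 ≥ 2: A takes the recursive branch, B peels the last element of the range
      have h0 : ((k + 1 : Nat) : Int) ≠ 0 := by push_cast; omega
      have h1 : ((k + 1 : Nat) : Int) ≠ 1 := by push_cast; omega
      have h2 : ¬ ((k + 1 : Nat) : Int) < 0 := by push_cast; omega
      rw [factorial_expr, if_neg h0, if_neg h1, if_neg h2]
      have hsub : ((k + 1 : Nat) : Int) - 1 = (k : Int) := by push_cast; ring
      rw [hsub, ih]
      have hrange : PySem.List.pyRange 2 (((k + 1 : Nat) : Int) + 1) 1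
          = PySem.List.pyRange 2 ((k : Int) + 1) 1 ++ [((k : Int) + 1)] := by
        have : ((k + 1 : Nat) : Int) + 1 = ((k : Int) + 1) + 1 := by push_cast; ring
        rw [this, PySem.List.pyRange_one_succ_right (by omega)]
      simp only [factorial_expr_alt, hrange, List.foldl_append, List.foldl_cons, List.foldl_nil]
      push_cast
      ring_nf

-- ===== VERDICT (by name: the statement is the Claim_ definition above) =====
theorem factorial_expr_spec : Claim_equal_factorial_expr := by
  intro n _ hpre
  unfold Pre_factorial_expr at hpre
  have ⟨m, hm⟩ : ∃ m : Nat, n = (m : Int) := ⟨n.toNat, by omega⟩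
  subst hm
  exact factorial_expr_eq_alt_nat m
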